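-- pv_equiv track=rewrite | github.com/xavifeds8/competative-programming | stack and queue/getpat.py | check
-- ===== SOURCE A (Python) =====
-- matrix = [["o" , "b" ,"b"] , ["b" , "o" , "b"] , ["b" , "b" , "o"]]
--
-- def check(x,y):
--     x_dir = [1 , 1, 1, 0 , 0 , -1 , -1 , -1 ]
--     y_dir = [-1, 0 ,1 ,-1 ,1 , -1 , 0 ,  1]
--     res = 0
--     for i in range(len(x_dir)):
--         if x+x_dir[i] >= 0 and x+x_dir[i] <len(matrix)  and y+y_dir[i] >= 0 and y+y_dir[i] <len(matrix):
--             if matrix[x+x_dir[i]][y+y_dir[i]] == "b":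
--                 res+=1
--     return res
-- ===== SOURCE B (Python) =====
-- matrix = [["o" , "b" ,"b"] , ["b" , "o" , "b"] , ["b" , "b" , "o"]]
--
-- def check(x, y):
--     n = len(matrix)
--     total = 0
--     for row in matrix[max(0, x - 1):max(0, x + 2)]:
--         total += row[max(0, y - 1):max(0, y + 2)].count("b")
--     if 0 <= x < n and 0 <= y < n and matrix[x][y] == "b":
--         total -= 1
--     return total
-- ===== Notes on version B (the rewrite author's own statement) =====
-- stated objective: simpler
-- what changed: Replaces the 8-element direction-offset loop with per-offset bounds checks by slicing the clamped 3x3 block (rows matrix[max(0,x-1):max(0,x+2)], columns likewise) and summing row.count('b'), then subtracting 1 when the centre cell itself is an in-bounds 'b'.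
import Mathlib
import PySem

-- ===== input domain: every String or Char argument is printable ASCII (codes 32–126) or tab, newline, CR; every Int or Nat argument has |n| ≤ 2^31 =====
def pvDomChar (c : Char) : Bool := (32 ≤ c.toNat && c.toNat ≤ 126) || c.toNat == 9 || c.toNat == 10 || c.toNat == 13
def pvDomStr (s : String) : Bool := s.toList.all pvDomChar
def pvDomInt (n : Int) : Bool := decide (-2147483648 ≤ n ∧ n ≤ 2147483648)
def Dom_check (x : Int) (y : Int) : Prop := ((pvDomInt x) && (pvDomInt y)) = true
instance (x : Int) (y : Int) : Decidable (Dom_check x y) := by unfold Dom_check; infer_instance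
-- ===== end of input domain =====

-- B replaces the 8-offset direction loop by slicing the clamped 3×3 block and counting 'b',
-- subtracting the centre if it is 'b' (objective: simpler).

-- the module-level grid both programs read
def pvMatrix : List (List String) := [["o", "b", "b"], ["b", "o", "b"], ["b", "b", "o"]]

-- ===== PORT A =====
def check (x : Int) (y : Int) : Int :=
  let x_dir : List Int := [1, 1, 1, 0, 0, -1, -1, -1]
  let y_dir : List Int := [-1, 0, 1, -1, 1, -1, 0, 1]
  (PySem.List.pyRange 0 (PySem.List.len x_dir) 1).foldl (fun res i =>
    let dx := PySem.List.pyGetD x_dir i 0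
    let dy := PySem.List.pyGetD y_dir i 0
    if x + dx ≥ 0 ∧ x + dx < PySem.List.len pvMatrix ∧ y + dy ≥ 0 ∧ y + dy < PySem.List.len pvMatrix then
      (if PySem.List.pyGetD (PySem.List.pyGetD pvMatrix (x + dx) []) (y + dy) "" = "b" then res + 1 else res)
    else res) 0

-- ===== PORT B =====
def check_alt (x : Int) (y : Int) : Int :=
  let n : Int := PySem.List.len pvMatrix
  let total : Int :=
    (PySem.List.slice pvMatrix (some (max 0 (x - 1))) (some (max 0 (x + 2)))).foldl
      (fun acc row =>
        acc + (PySem.List.count (PySem.List.slice row (some (max 0 (y - 1))) (some (max 0 (y + 2)))) "b" : Int)) 0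
  if 0 ≤ x ∧ x < n ∧ 0 ≤ y ∧ y < n ∧ PySem.List.pyGetD (PySem.List.pyGetD pvMatrix x []) y "" = "b" then
    total - 1
  else total

-- ===== PRECONDITION & SPEC =====
def Spec_check (x : Int) (y : Int) (out : Int) : Prop := out = check_alt x y
instance (x : Int) (y : Int) (out : Int) : Decidable (Spec_check x y out) := by unfold Spec_check; infer_instance

-- ===== CLAIM (what is proved, stated in full; the proofs are below) =====
def Claim_equal_check : Prop := ∀ (x : Int) (y : Int), Dom_check x y → Spec_check x y (check x y)

-- ===== LEMMAS AND PROOFS =====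

-- outside the band -1 ≤ x ≤ 3 / -1 ≤ y ≤ 3 both programs see no grid cell
set_option maxHeartbeats 1000000 in
lemma check_zero_of_far (x y : Int) (h : x ≤ -2 ∨ 4 ≤ x ∨ y ≤ -2 ∨ 4 ≤ y) : check x y = 0 := by
  have hr : PySem.List.pyRange 0 (PySem.List.len ([1, 1, 1, 0, 0, -1, -1, -1] : List Int)) 1
      = [0, 1, 2, 3, 4, 5, 6, 7] := by decide
  simp only [check]
  rw [hr]
  refine Eq.trans (PySem.List.foldl_congr_mem (g := fun (res : Int) (_ : Int) => res) _ _ _ ?_)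
    (List.foldl_fixed _)
  intro acc i hi
  fin_cases hi <;>
    (simp only [pysem, pvMatrix]; norm_num; try (intros; exfalso; omega))

lemma slice_band_empty {α : Type} (l : List α) (hl : l.length = 3) (v : Int)
    (hv : v ≤ -2 ∨ 4 ≤ v) :
    PySem.List.slice l (some (max 0 (v - 1))) (some (max 0 (v + 2))) = [] := by
  rcases hv with hv | hv
  · rw [show max 0 (v - 1) = 0 by omega, show max 0 (v + 2) = 0 by omega]
    simp [PySem.List.slice_to]
  · rw [show max 0 (v - 1) = v - 1 by omega, show max 0 (v + 2) = v + 2 by omega,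
      PySem.List.slice_toNat l (by omega) (by omega),
      List.drop_eq_nil_of_le (by rw [hl]; omega)]
    simp

lemma check_alt_zero_of_far (x y : Int) (h : x ≤ -2 ∨ 4 ≤ x ∨ y ≤ -2 ∨ 4 ≤ y) : check_alt x y = 0 := by
  have hlen : PySem.List.len pvMatrix = 3 := by decide
  have hfold :
      (PySem.List.slice pvMatrix (some (max 0 (x - 1))) (some (max 0 (x + 2)))).foldl
        (fun acc row =>
          acc + (PySem.List.count
            (PySem.List.slice row (some (max 0 (y - 1))) (some (max 0 (y + 2)))) "b" : Int)) 0 = 0 := by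
    by_cases hx : x ≤ -2 ∨ 4 ≤ x
    · rw [slice_band_empty pvMatrix (by decide) x hx]
      rfl
    · have hy : y ≤ -2 ∨ 4 ≤ y := by omega
      refine Eq.trans
        (PySem.List.foldl_congr_mem (g := fun (acc : Int) (_ : List String) => acc) _ _ _ ?_)
        (List.foldl_fixed _)
      intro acc row hrow
      have hm : row ∈ pvMatrix := PySem.List.mem_of_mem_slice pvMatrix _ _ hrow
      have hl : row.length = 3 := by fin_cases hm <;> decide
      rw [slice_band_empty row hl y hy]
      simp [PySem.List.count]
  simp only [check_alt, hlen, hfold]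
  rw [if_neg (by rintro ⟨h1, h2, h3, h4, -⟩; omega)]

-- ===== VERDICT (by name: the statement is the Claim_ definition above) =====
theorem check_spec : Claim_equal_check := by
  intro x y _
  unfold Spec_check
  by_cases hx : -1 ≤ x ∧ x ≤ 3
  · by_cases hy : -1 ≤ y ∧ y ≤ 3
    · obtain ⟨hx1, hx2⟩ := hx
      obtain ⟨hy1, hy2⟩ := hy
      interval_cases x <;> interval_cases y <;> decide
    · rw [check_zero_of_far x y (by omega), check_alt_zero_of_far x y (by omega)]
  · rw [check_zero_of_far x y (by omega), check_alt_zero_of_far x y (by omega)]
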